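-- pv_equiv track=rewrite | github.com/Alpha-Guardian/Engram | scripts/build_public_trained_lowrank_adapter_checkpoint.py | _build_token_bigrams
-- ===== SOURCE A (Python) =====
-- def _build_token_bigrams(tokens: list[str], max_items: int = 96) -> list[str]:
--     if max_items <= 0 or len(tokens) <= 1:
--         return []
--     out: list[str] = []
--     seen: set[str] = set()
--     for idx in range(len(tokens) - 1):
--         left = str(tokens[idx]).strip().lower()
--         right = str(tokens[idx + 1]).strip().lower()
--         if not left or not right:
--             continue
--         item = f"bg:{left}_{right}"
--         if item in seen:
--             continue
--         seen.add(item)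
--         out.append(item)
--         if len(out) >= max_items:
--             break
--     return out
-- ===== SOURCE B (Python) =====
-- def _build_token_bigrams(tokens: list[str], max_items: int = 96) -> list[str]:
--     if max_items <= 0 or len(tokens) <= 1:
--         return []
--     norm = [str(t).strip().lower() for t in tokens]
--     first: dict[str, int] = {}
--     for idx, (left, right) in enumerate(zip(norm, norm[1:])):
--         if left and right:
--             first.setdefault(f"bg:{left}_{right}", idx)
--     ordered = sorted(first.items(), key=lambda kv: kv[1])
--     return [item for item, _ in ordered][:max_items]
-- ===== Notes on version B (the rewrite author's own statement) =====
-- stated objective: alternative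
-- what changed: Instead of A's single pass holding a seen-set and breaking early, B normalizes all tokens once, records each bigram's FIRST index in a dict via setdefault, recovers first-occurrence order by sorting the dict items by that stored index, and slices the keys to max_items.
import Mathlib
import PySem

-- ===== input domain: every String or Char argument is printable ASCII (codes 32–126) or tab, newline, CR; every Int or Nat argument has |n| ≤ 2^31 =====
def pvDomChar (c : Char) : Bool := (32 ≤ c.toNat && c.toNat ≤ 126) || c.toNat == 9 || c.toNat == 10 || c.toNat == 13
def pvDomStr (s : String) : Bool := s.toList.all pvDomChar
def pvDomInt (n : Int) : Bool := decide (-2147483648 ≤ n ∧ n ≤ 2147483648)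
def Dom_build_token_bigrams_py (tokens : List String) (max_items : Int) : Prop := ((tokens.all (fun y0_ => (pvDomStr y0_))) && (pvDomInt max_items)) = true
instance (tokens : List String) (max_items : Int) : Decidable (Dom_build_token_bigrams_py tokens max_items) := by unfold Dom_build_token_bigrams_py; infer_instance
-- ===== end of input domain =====

-- B replaces A's one-pass loop (seen-set, append, early break) by: normalize all tokens once,
-- record each bigram's FIRST index in a dict via setdefault, sort the items by that index, slice.
-- Same output; no speed claim.

-- ===== PORT A =====
-- the 'for idx in range(len(tokens)-1)' loop, walking the current token and the remaining ones;
-- state: seen set, out list; early break when len(out) >= max_items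
def bgLoopA (cur : String) (rest : List String) (seen : PySem.Set String)
    (out : List String) (max_items : Int) : List String :=
  match rest with
  | [] => out
  | nxt :: tl =>
    let left := PySem.Str.lower (PySem.Str.strip cur)
    let right := PySem.Str.lower (PySem.Str.strip nxt)
    if left = "" ∨ right = "" then bgLoopA nxt tl seen out max_items
    else
      let item := "bg:" ++ left ++ "_" ++ right
      if PySem.Set.contains seen item then bgLoopA nxt tl seen out max_items
      else
        let out' := out ++ [item]
        if max_items ≤ (out'.length : Int) then out'
        else bgLoopA nxt tl (PySem.Set.add seen item) out' max_items

def build_token_bigrams_py (tokens : List String) (max_items : Int) : List String :=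
  if max_items ≤ 0 ∨ (tokens.length : Int) ≤ 1 then []
  else
    match tokens with
    | [] => []
    | t :: ts => bgLoopA t ts PySem.Set.empty [] max_items

-- ===== PORT B =====
-- body of Source B's 'for idx, (left, right) in enumerate(zip(norm, norm[1:]))' loop
def bgStep (d : PySem.Dict String Int) (p : Int × String × String) : PySem.Dict String Int :=
  if ¬ p.2.1 = "" ∧ ¬ p.2.2 = "" then d.setdefault ("bg:" ++ p.2.1 ++ "_" ++ p.2.2) p.1 else d

-- norm = [str(t).strip().lower() for t in tokens]; first = the setdefault fold over
-- enumerate(zip(norm, norm[1:])); then sorted(first.items(), key=lambda kv: kv[1]), keys, slice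
def build_token_bigrams_py_alt (tokens : List String) (max_items : Int) : List String :=
  if max_items ≤ 0 ∨ (tokens.length : Int) ≤ 1 then []
  else
    PySem.List.slice
      ((PySem.List.sorted
          ((PySem.List.enumerate
              ((tokens.map (fun t => PySem.Str.lower (PySem.Str.strip t))).zip
                (PySem.List.slice (tokens.map (fun t => PySem.Str.lower (PySem.Str.strip t)))
                  (some 1) none)) 0).foldl bgStep PySem.Dict.empty).items
          (fun kv => kv.2) false).map (·.1))
      none (some max_items)

-- ===== PRECONDITION & SPEC =====
def Spec_build_token_bigrams_py (tokens : List String) (max_items : Int) (out : List String) : Prop := out = build_token_bigrams_py_alt tokens max_items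
instance (tokens : List String) (max_items : Int) (out : List String) : Decidable (Spec_build_token_bigrams_py tokens max_items out) := by unfold Spec_build_token_bigrams_py; infer_instance

-- ===== CLAIM (what is proved, stated in full; the proofs are below) =====
def Claim_equal_build_token_bigrams_py : Prop := ∀ (tokens : List String) (max_items : Int), Dom_build_token_bigrams_py tokens max_items → Spec_build_token_bigrams_py tokens max_items (build_token_bigrams_py tokens max_items)

-- ===== LEMMAS AND PROOFS =====

-- ordered first-occurrence dedup relative to an already-seen set
def dedupFrom (xs : List String) (seen : PySem.Set String) : List String :=
  match xs with
  | [] => []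
  | x :: tl =>
    if PySem.Set.contains seen x then dedupFrom tl seen
    else x :: dedupFrom tl (PySem.Set.add seen x)

-- candidates built pairwise along the token list (A's traversal)
def candsFrom (cur : String) (rest : List String) : List String :=
  match rest with
  | [] => []
  | nxt :: tl =>
    let left := PySem.Str.lower (PySem.Str.strip cur)
    let right := PySem.Str.lower (PySem.Str.strip nxt)
    if left = "" ∨ right = "" then candsFrom nxt tl
    else ("bg:" ++ left ++ "_" ++ right) :: candsFrom nxt tl

-- candidates of B's enumerated normalized pair list, indices ignored
def candsP : List (Int × String × String) → List String
  | [] => []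
  | p :: tl =>
    if ¬ p.2.1 = "" ∧ ¬ p.2.2 = "" then ("bg:" ++ p.2.1 ++ "_" ++ p.2.2) :: candsP tl
    else candsP tl

-- loop invariant: A's loop equals out ++ (remaining deduped candidates, truncated to room left)
lemma bgLoopA_eq (rest : List String) (cur : String) (seen : PySem.Set String)
    (out : List String) (m : Int) (h : (out.length : Int) < m) :
    bgLoopA cur rest seen out m
      = out ++ (dedupFrom (candsFrom cur rest) seen).take (m.toNat - out.length) := by
  induction rest generalizing cur seen out with
  | nil => simp [bgLoopA, candsFrom, dedupFrom]
  | cons nxt tl ih =>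
    simp only [bgLoopA, candsFrom]
    by_cases he : PySem.Str.lower (PySem.Str.strip cur) = "" ∨
        PySem.Str.lower (PySem.Str.strip nxt) = ""
    · rw [if_pos he, if_pos he]
      exact ih nxt seen out h
    · rw [if_neg he, if_neg he]
      set item := "bg:" ++ PySem.Str.lower (PySem.Str.strip cur) ++ "_" ++
        PySem.Str.lower (PySem.Str.strip nxt) with hitem
      simp only [dedupFrom]
      by_cases hs : PySem.Set.contains seen item = true
      · rw [if_pos hs, if_pos hs]
        exact ih nxt seen out h
      · rw [if_neg hs, if_neg hs]
        have htake : (item :: dedupFrom (candsFrom nxt tl) (PySem.Set.add seen item)).take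
            (m.toNat - out.length)
            = item :: (dedupFrom (candsFrom nxt tl) (PySem.Set.add seen item)).take
              (m.toNat - out.length - 1) := by
          obtain ⟨k, hk⟩ : ∃ k, m.toNat - out.length = k + 1 :=
            ⟨m.toNat - out.length - 1, by omega⟩
          simp [hk]
        by_cases hb : m ≤ ((out ++ [item]).length : Int)
        · have h1 : m.toNat - out.length = 1 := by
            simp at hb; omega
          rw [if_pos hb, htake, h1]
          simp
        · have h' : (((out ++ [item]).length : Nat) : Int) < m := by
            simp at hb ⊢; omega
          rw [if_neg hb, ih nxt (PySem.Set.add seen item) (out ++ [item]) h', htake]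
          simp only [List.append_assoc, List.singleton_append, List.length_append,
            List.length_cons, List.length_nil]
          congr 2

-- B's enumerated-pair candidates are A's pairwise candidates
lemma candsP_enumerate (ts : List String) (t : String) (s : Int) :
    candsP (PySem.List.enumerate
      (((t :: ts).map (fun x => PySem.Str.lower (PySem.Str.strip x))).zip
        (PySem.List.slice ((t :: ts).map (fun x => PySem.Str.lower (PySem.Str.strip x)))
          (some 1) none)) s)
      = candsFrom t ts := by
  induction ts generalizing t s with
  | nil =>
    simp [candsP, candsFrom, PySem.List.slice_from_one, PySem.List.enumerate_nil]
  | cons nxt tl ih =>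
    have ih' := ih nxt (s + 1)
    simp only [PySem.List.slice_from_one, List.tail_cons, List.map_cons] at ih' ⊢
    rw [List.zip_cons_cons, PySem.List.enumerate_cons]
    simp only [candsP, candsFrom]
    by_cases hc : ¬ PySem.Str.lower (PySem.Str.strip t) = "" ∧
        ¬ PySem.Str.lower (PySem.Str.strip nxt) = ""
    · rw [if_pos hc, if_neg (fun h => h.elim hc.1 hc.2), ih']
    · have hor : PySem.Str.lower (PySem.Str.strip t) = "" ∨
          PySem.Str.lower (PySem.Str.strip nxt) = "" := by
        rcases not_and_or.mp hc with h | h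
        · exact Or.inl (not_not.mp h)
        · exact Or.inr (not_not.mp h)
      rw [if_neg hc, if_pos hor, ih']

-- invariant of B's dict-building fold: the keys, in order, are the deduped candidates
lemma fold_keys (l : List (Int × String × String)) (d : PySem.Dict String Int)
    (hn : d.keys.Nodup) :
    (l.foldl bgStep d).items.map (·.1) = d.keys ++ dedupFrom (candsP l) d.keys := by
  induction l generalizing d with
  | nil => simp [candsP, dedupFrom, PySem.Dict.keys]
  | cons p tl ih =>
    simp only [List.foldl_cons, bgStep, candsP]
    by_cases hc : ¬ p.2.1 = "" ∧ ¬ p.2.2 = ""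
    · rw [if_pos hc, if_pos hc]
      set item := "bg:" ++ p.2.1 ++ "_" ++ p.2.2 with hitem
      simp only [dedupFrom]
      by_cases hd : d.contains item = true
      · have hm : item ∈ d.keys := (PySem.Dict.contains_iff_mem_keys d item).mp hd
        have hsc : PySem.Set.contains d.keys item = true :=
          (PySem.Set.contains_iff d.keys item).mpr hm
        rw [PySem.Dict.setdefault_of_contains d p.1 hd, if_pos hsc]
        exact ih d hn
      · have hd' : d.contains item = false := by simpa using hd
        have hm : item ∉ d.keys := fun h => by
          simp [(PySem.Dict.contains_iff_mem_keys d item).mpr h] at hd'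
        have hsc : ¬ PySem.Set.contains d.keys item = true := fun h =>
          hm ((PySem.Set.contains_iff d.keys item).mp h)
        rw [PySem.Dict.setdefault_of_not_contains d p.1 hd', if_neg hsc]
        have hk : (d.insert item p.1).keys = d.keys ++ [item] :=
          PySem.Dict.keys_insert_of_not_contains d p.1 hd'
        have hn' : (d.insert item p.1).keys.Nodup := by
          rw [hk]
          simp [List.nodup_append, hn]
          exact fun a ha he => hm (he ▸ ha)
        rw [ih (d.insert item p.1) hn', hk, PySem.Set.add_of_not_mem hm,
          List.append_assoc, List.singleton_append]
    · rw [if_neg hc, if_neg hc]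
      exact ih d hn

-- invariant of B's dict-building fold: the stored first indices are strictly increasing
lemma fold_vals (l : List (Int × String × String)) (d : PySem.Dict String Int)
    (hp : d.items.Pairwise (fun a b => a.2 < b.2))
    (hlt : ∀ q ∈ d.items, ∀ p ∈ l, q.2 < p.1)
    (hinc : l.Pairwise (fun p q => p.1 < q.1)) :
    (l.foldl bgStep d).items.Pairwise (fun a b => a.2 < b.2) := by
  induction l generalizing d with
  | nil => simpa using hp
  | cons p tl ih =>
    have hinc' := (List.pairwise_cons.mp hinc).2
    have hhead := (List.pairwise_cons.mp hinc).1
    simp only [List.foldl_cons, bgStep]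
    by_cases hc : ¬ p.2.1 = "" ∧ ¬ p.2.2 = ""
    · rw [if_pos hc]
      set item := "bg:" ++ p.2.1 ++ "_" ++ p.2.2 with hitem
      by_cases hd : d.contains item = true
      · rw [PySem.Dict.setdefault_of_contains d p.1 hd]
        exact ih d hp (fun q hq p' hp' => hlt q hq p' (List.mem_cons_of_mem _ hp')) hinc'
      · have hd' : d.contains item = false := by simpa using hd
        rw [PySem.Dict.setdefault_of_not_contains d p.1 hd']
        have hitems : (d.insert item p.1).items = d.items ++ [(item, p.1)] :=
          PySem.Dict.items_insert_of_not_contains d p.1 hd'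
        refine ih (d.insert item p.1) ?_ ?_ hinc'
        · rw [hitems, List.pairwise_append]
          refine ⟨hp, by simp, ?_⟩
          intro a ha b hb
          simp at hb
          rw [hb]
          exact hlt a ha p (List.mem_cons_self ..)
        · intro q hq p' hp'
          rw [hitems] at hq
          rcases List.mem_append.mp hq with h | h
          · exact hlt q h p' (List.mem_cons_of_mem _ hp')
          · simp at h
            rw [h]
            exact hhead p' hp'
    · rw [if_neg hc]
      exact ih d hp (fun q hq p' hp' => hlt q hq p' (List.mem_cons_of_mem _ hp')) hinc'

-- ===== VERDICT (by name: the statement is the Claim_ definition above) =====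
theorem build_token_bigrams_py_spec : Claim_equal_build_token_bigrams_py := by
  intro tokens max_items _hdom
  unfold Spec_build_token_bigrams_py build_token_bigrams_py build_token_bigrams_py_alt
  by_cases hg : max_items ≤ 0 ∨ (tokens.length : Int) ≤ 1
  · rw [if_pos hg, if_pos hg]
  · rw [if_neg hg, if_neg hg]
    push Not at hg
    obtain ⟨hm, hlen⟩ := hg
    match tokens, hlen with
    | t :: ts, _ =>
      show bgLoopA t ts PySem.Set.empty [] max_items = _
      set l := PySem.List.enumerate
        (((t :: ts).map (fun x => PySem.Str.lower (PySem.Str.strip x))).zip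
          (PySem.List.slice ((t :: ts).map (fun x => PySem.Str.lower (PySem.Str.strip x)))
            (some 1) none)) 0 with hl
      set first := l.foldl bgStep PySem.Dict.empty with hfirst
      have hinc : l.Pairwise (fun p q => p.1 < q.1) := PySem.List.pairwise_lt_enumerate _ _
      have hvals : first.items.Pairwise (fun a b => a.2 < b.2) :=
        fold_vals l PySem.Dict.empty (by simp [PySem.Dict.empty])
          (by simp [PySem.Dict.empty]) hinc
      have hsorted : PySem.List.sorted first.items (fun kv => kv.2) false = first.items :=
        PySem.List.sorted_eq_self_of_pairwise _ _ (hvals.imp (fun h => le_of_lt h))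
      have hkeys : first.items.map (·.1) = dedupFrom (candsFrom t ts) PySem.Set.empty := by
        rw [hfirst, fold_keys l PySem.Dict.empty (by simp [PySem.Dict.empty, PySem.Dict.keys]),
          hl, candsP_enumerate]
        simp [PySem.Dict.empty, PySem.Dict.keys, PySem.Set.empty]
      rw [bgLoopA_eq ts t PySem.Set.empty [] max_items (by simpa using hm)]
      rw [hsorted, hkeys]
      have hm' : max_items = ((max_items.toNat : Nat) : Int) := by omega
      rw [hm', PySem.List.slice_to_natCast]
      simp
      omega
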